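-- pv_equiv track=rewrite | github.com/MihaiM21/TurnOneTelemetry | src/utils/teamColorPicker.py | get_team_color
-- ===== SOURCE A (Python) =====
-- def get_team_color(team):
--
--     team_aliases = {
--         "Alpine": ["alpine", "alp"],
--         "Aston Martin": ["aston martin", "am", "aston"],
--         "Ferrari": ["ferrari", "fer"],
--         "Haas": ["haas", "has"],
--         "Kick Sauber": ["kick sauber", "sauber", "kick"],
--         "McLaren": ["mclaren", "mcl"],
--         "Mercedes": ["mercedes", "merc", "mer"],
--         "Racing Bulls": ["racing bulls", "rb", "racingbulls", "visa cash app rb", "vcarb"],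
--         "Red Bull Racing": ["red bull racing", "redbull", "rbr"],
--         "Williams": ["williams", "wil"]
--     }
--
--     team_colors = {
--         "Alpine": "#0093CC",
--         "Aston Martin": "#229971",
--         "Ferrari": "#E80020",
--         "Haas": "#B6BABD",
--         "Kick Sauber": "#52E252",
--         "McLaren": "#FF8000",
--         "Mercedes": "#27F4D2",
--         "Racing Bulls": "#6692FF",
--         "Red Bull Racing": "#3671C6",
--         "Williams": "#64C4FF",
--     }
--
--
--
--     team = team.lower().strip()
--
--     for official_name, aliases in team_aliases.items():
--         if team in aliases:
--             return team_colors[official_name]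
--
--     return "#FFFFFF"
-- ===== SOURCE B (Python) =====
-- # Binary search over a sorted (alias, color) table instead of scanning per-team alias lists.
-- _TABLE = [
--     ("alp", "#0093CC"),
--     ("alpine", "#0093CC"),
--     ("am", "#229971"),
--     ("aston", "#229971"),
--     ("aston martin", "#229971"),
--     ("fer", "#E80020"),
--     ("ferrari", "#E80020"),
--     ("haas", "#B6BABD"),
--     ("has", "#B6BABD"),
--     ("kick", "#52E252"),
--     ("kick sauber", "#52E252"),
--     ("mcl", "#FF8000"),
--     ("mclaren", "#FF8000"),
--     ("mer", "#27F4D2"),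
--     ("merc", "#27F4D2"),
--     ("mercedes", "#27F4D2"),
--     ("racing bulls", "#6692FF"),
--     ("racingbulls", "#6692FF"),
--     ("rb", "#6692FF"),
--     ("rbr", "#3671C6"),
--     ("red bull racing", "#3671C6"),
--     ("redbull", "#3671C6"),
--     ("sauber", "#52E252"),
--     ("vcarb", "#6692FF"),
--     ("visa cash app rb", "#6692FF"),
--     ("wil", "#64C4FF"),
--     ("williams", "#64C4FF"),
-- ]
--
-- def get_team_color(team):
--     t = team.lower().strip()
--     lo, hi = 0, len(_TABLE)
--     while lo < hi:
--         mid = (lo + hi) // 2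
--         key, color = _TABLE[mid]
--         if key < t:
--             lo = mid + 1
--         elif t < key:
--             hi = mid
--         else:
--             return color
--     return "#FFFFFF"
-- ===== Notes on version B (the rewrite author's own statement) =====
-- stated objective: alternative
-- what changed: B flattens the alias tables into one sorted (alias, color) list and finds the normalized input by a hand-written binary search loop, instead of A's linear scan over per-team alias lists with membership tests; aliases are unique, so at most one entry can match and the search order change cannot alter the result.
import Mathlib
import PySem

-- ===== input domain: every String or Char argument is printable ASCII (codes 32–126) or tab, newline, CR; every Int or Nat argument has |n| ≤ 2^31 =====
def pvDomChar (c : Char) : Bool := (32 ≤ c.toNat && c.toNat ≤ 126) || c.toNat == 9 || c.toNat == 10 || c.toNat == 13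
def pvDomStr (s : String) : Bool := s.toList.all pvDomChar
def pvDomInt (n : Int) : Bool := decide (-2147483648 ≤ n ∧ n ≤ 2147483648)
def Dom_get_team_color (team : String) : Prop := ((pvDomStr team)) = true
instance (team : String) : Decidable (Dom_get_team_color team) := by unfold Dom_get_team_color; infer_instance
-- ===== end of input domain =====

-- B replaces A's per-team scan over alias lists by binary search in one sorted (alias, color) table (alternative algorithm; same result).

-- ===== PORT A =====
-- the two literal tables the Python function defines verbatim
def pvTeamAliases : List (String × List String) :=
  [("Alpine", ["alpine", "alp"]),
   ("Aston Martin", ["aston martin", "am", "aston"]),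
   ("Ferrari", ["ferrari", "fer"]),
   ("Haas", ["haas", "has"]),
   ("Kick Sauber", ["kick sauber", "sauber", "kick"]),
   ("McLaren", ["mclaren", "mcl"]),
   ("Mercedes", ["mercedes", "merc", "mer"]),
   ("Racing Bulls", ["racing bulls", "rb", "racingbulls", "visa cash app rb", "vcarb"]),
   ("Red Bull Racing", ["red bull racing", "redbull", "rbr"]),
   ("Williams", ["williams", "wil"])]

def pvTeamColors : PySem.Dict String String :=
  PySem.Dict.ofList
  [("Alpine", "#0093CC"),
   ("Aston Martin", "#229971"),
   ("Ferrari", "#E80020"),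
   ("Haas", "#B6BABD"),
   ("Kick Sauber", "#52E252"),
   ("McLaren", "#FF8000"),
   ("Mercedes", "#27F4D2"),
   ("Racing Bulls", "#6692FF"),
   ("Red Bull Racing", "#3671C6"),
   ("Williams", "#64C4FF")]

-- A's for-loop over team_aliases.items(); team_colors[official_name] can never raise KeyError
-- (every alias-table key is a colors key), so the total-form default "" is never the result
def pvScanA (t : String) : List (String × List String) → String
  | [] => "#FFFFFF"
  | (name, aliases) :: rest =>
      if aliases.contains t then PySem.Dict.getD pvTeamColors name "" else pvScanA t rest

def get_team_color (team : String) : String :=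
  pvScanA (PySem.Str.strip (PySem.Str.lower team)) pvTeamAliases

-- ===== PORT B =====
-- Source B's sorted literal table _TABLE
def pvTable : List (String × String) :=
  [("alp", "#0093CC"),
   ("alpine", "#0093CC"),
   ("am", "#229971"),
   ("aston", "#229971"),
   ("aston martin", "#229971"),
   ("fer", "#E80020"),
   ("ferrari", "#E80020"),
   ("haas", "#B6BABD"),
   ("has", "#B6BABD"),
   ("kick", "#52E252"),
   ("kick sauber", "#52E252"),
   ("mcl", "#FF8000"),
   ("mclaren", "#FF8000"),
   ("mer", "#27F4D2"),
   ("merc", "#27F4D2"),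
   ("mercedes", "#27F4D2"),
   ("racing bulls", "#6692FF"),
   ("racingbulls", "#6692FF"),
   ("rb", "#6692FF"),
   ("rbr", "#3671C6"),
   ("red bull racing", "#3671C6"),
   ("redbull", "#3671C6"),
   ("sauber", "#52E252"),
   ("vcarb", "#6692FF"),
   ("visa cash app rb", "#6692FF"),
   ("wil", "#64C4FF"),
   ("williams", "#64C4FF")]

-- Source B's while-loop binary search; fuel (initially the table length ≥ hi - lo) only makes the
-- loop total. String '<' is ported as List.Lex '<' on .toList (exact for Python's str '<',
-- see PYSEM.md); _TABLE[mid] is always in range when lo < hi ≤ len, so the none branch is dead.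
def pvBsearch (t : List Char) : Nat → Nat → Nat → String
  | 0, _, _ => "#FFFFFF"
  | Nat.succ fuel, lo, hi =>
    if lo < hi then
      match pvTable[(lo + hi) / 2]? with
      | some kv =>
        if kv.1.toList < t then pvBsearch t fuel ((lo + hi) / 2 + 1) hi
        else if t < kv.1.toList then pvBsearch t fuel lo ((lo + hi) / 2)
        else kv.2
      | none => ""
    else "#FFFFFF"

def get_team_color_alt (team : String) : String :=
  pvBsearch (PySem.Str.strip (PySem.Str.lower team)).toList pvTable.length 0 pvTable.length

-- ===== PRECONDITION & SPEC =====
def Spec_get_team_color (team : String) (out : String) : Prop := out = get_team_color_alt team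
instance (team : String) (out : String) : Decidable (Spec_get_team_color team out) := by unfold Spec_get_team_color; infer_instance

-- ===== CLAIM (what is proved, stated in full; the proofs are below) =====
def Claim_equal_get_team_color : Prop := ∀ (team : String), Dom_get_team_color team → Spec_get_team_color team (get_team_color team)

-- ===== LEMMAS AND PROOFS =====
-- the 27 distinct aliases (= the keys of pvTable)
def pvKeys : List String :=
  ["alp", "alpine", "am", "aston", "aston martin", "fer", "ferrari", "haas", "has",
   "kick", "kick sauber", "mcl", "mclaren", "mer", "merc", "mercedes", "racing bulls",
   "racingbulls", "rb", "rbr", "red bull racing", "redbull", "sauber", "vcarb",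
   "visa cash app rb", "wil", "williams"]

theorem pv_aliases_sub : ∀ pr ∈ pvTeamAliases, ∀ a ∈ pr.2, a ∈ pvKeys := by decide

theorem pv_table_sub : ∀ p ∈ pvTable, p.1 ∈ pvKeys := by decide

theorem pv_scan_nomatch (t : String) :
    ∀ l : List (String × List String), (∀ pr ∈ l, t ∉ pr.2) → pvScanA t l = "#FFFFFF" := by
  intro l
  induction l with
  | nil => intro _; rfl
  | cons hd tl ih =>
    intro h
    have hni : t ∉ hd.2 := h hd (List.mem_cons_self ..)
    obtain ⟨name, aliases⟩ := hd
    simp only [pvScanA]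
    rw [if_neg (by simpa using hni)]
    exact ih fun pr hpr => h pr (List.mem_cons_of_mem _ hpr)

theorem pv_bsearch_nomatch (t : List Char) (h : ∀ p ∈ pvTable, p.1.toList ≠ t) :
    ∀ fuel lo hi, hi ≤ pvTable.length → pvBsearch t fuel lo hi = "#FFFFFF" := by
  intro fuel
  induction fuel with
  | zero => intro lo hi _; rfl
  | succ n ih =>
    intro lo hi hhi
    unfold pvBsearch
    by_cases hlt : lo < hi
    · rw [if_pos hlt]
      have hmid : (lo + hi) / 2 < pvTable.length := by omega
      rw [List.getElem?_eq_getElem hmid]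
      have hne := h _ (List.getElem_mem hmid)
      by_cases h1 : pvTable[(lo + hi) / 2].1.toList < t
      · simp only [h1, if_true]
        exact ih _ _ hhi
      · simp only [h1, if_false]
        by_cases h2 : t < pvTable[(lo + hi) / 2].1.toList
        · simp only [h2, if_true]
          exact ih _ _ (le_trans (by omega) hhi)
        · exact absurd (le_antisymm (not_lt.mp h2) (not_lt.mp h1)) hne
    · rw [if_neg hlt]

theorem pv_toList_ne (a b : String) (h : a ≠ b) : a.toList ≠ b.toList :=
  fun e => h (String.toList_inj.mp e)

theorem pv_main (t : String) :
    pvScanA t pvTeamAliases = pvBsearch t.toList pvTable.length 0 pvTable.length := by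
  by_cases hmem : t ∈ pvKeys
  · simp only [pvKeys, List.mem_cons, List.not_mem_nil, or_false] at hmem
    rcases hmem with rfl|rfl|rfl|rfl|rfl|rfl|rfl|rfl|rfl|rfl|rfl|rfl|rfl|rfl|
      rfl|rfl|rfl|rfl|rfl|rfl|rfl|rfl|rfl|rfl|rfl|rfl|rfl <;> decide
  · rw [pv_scan_nomatch t pvTeamAliases
        (fun pr hpr ht => hmem (pv_aliases_sub pr hpr t ht)),
      pv_bsearch_nomatch t.toList
        (fun p hp => pv_toList_ne _ _ (fun e => hmem (e ▸ pv_table_sub p hp)))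
        _ _ _ le_rfl]

-- ===== VERDICT (by name: the statement is the Claim_ definition above) =====
theorem get_team_color_spec : Claim_equal_get_team_color := by
  intro team _
  unfold Spec_get_team_color get_team_color get_team_color_alt
  exact pv_main _
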